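-- pv_equiv track=rewrite | github.com/orensul/analogies_mining | analogies_mining_exp_annotators_consistency.py | convert_data_for_inter_annotator_clac
-- ===== SOURCE A (Python) =====
-- def convert_data_for_inter_annotator_clac(actual, predicted):
--     annotator_pairs_annotations = {'expert': [], 'A1': [], 'A2': [], 'A3': []}
--     annotator_pairs_annotations['expert'] = actual
--
--     for i, label in enumerate(predicted):
--         if i % 15 <= 4:
--             annotator_pairs_annotations['A1'].append(label)
--         elif 4 < i % 15 <= 9:
--             annotator_pairs_annotations['A2'].append(label)
--         else:
--             annotator_pairs_annotations['A3'].append(label)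
--
--     return annotator_pairs_annotations
-- ===== SOURCE B (Python) =====
-- def convert_data_for_inter_annotator_clac(actual, predicted):
--     A1, A2, A3 = [], [], []
--     for j in range(0, len(predicted), 15):
--         block = predicted[j:j + 15]
--         A1 += block[0:5]
--         A2 += block[5:10]
--         A3 += block[10:15]
--     return {'expert': actual, 'A1': A1, 'A2': A2, 'A3': A3}
-- ===== Notes on version B (the rewrite author's own statement) =====
-- stated objective: alternative
-- what changed: Replaces the per-element enumerate loop with an i%15 three-way branch by a traversal in fixed-size blocks of 15 via range(0,len,15), extending each annotator list with the slices block[0:5], block[5:10], block[10:15].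
import Mathlib
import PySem

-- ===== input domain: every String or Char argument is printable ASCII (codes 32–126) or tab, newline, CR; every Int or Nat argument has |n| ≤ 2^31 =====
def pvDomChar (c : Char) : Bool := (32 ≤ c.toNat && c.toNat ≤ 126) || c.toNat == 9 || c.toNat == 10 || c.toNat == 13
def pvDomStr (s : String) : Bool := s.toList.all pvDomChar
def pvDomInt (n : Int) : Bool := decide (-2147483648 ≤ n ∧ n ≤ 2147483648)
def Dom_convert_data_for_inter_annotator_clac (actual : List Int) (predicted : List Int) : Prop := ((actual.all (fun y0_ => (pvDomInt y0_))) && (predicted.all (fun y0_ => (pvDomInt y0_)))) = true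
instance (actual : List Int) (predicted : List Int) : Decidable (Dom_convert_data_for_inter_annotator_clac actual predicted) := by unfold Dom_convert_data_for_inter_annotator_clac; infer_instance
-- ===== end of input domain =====

-- B partitions `predicted` by blocks of 15 with slices instead of A's per-element i%15 branch; alternative decomposition, same cost.


-- ===== PORT A =====
def convert_data_for_inter_annotator_clac (actual : List Int) (predicted : List Int) : List (String × List Int) :=
  let d : PySem.Dict String (List Int) :=
    PySem.Dict.ofList [("expert", []), ("A1", []), ("A2", []), ("A3", [])]
  let d := d.insert "expert" actual
  let d := (PySem.List.enumerate predicted 0).foldl (fun d p =>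
      if PySem.Int.mod p.1 15 ≤ 4 then d.modify "A1" [] (fun l => l ++ [p.2])
      else if 4 < PySem.Int.mod p.1 15 ∧ PySem.Int.mod p.1 15 ≤ 9 then d.modify "A2" [] (fun l => l ++ [p.2])
      else d.modify "A3" [] (fun l => l ++ [p.2])) d
  d.items

-- ===== PORT B =====
-- the `for j in range(0, len, 15)` loop over blocks, as structural recursion on 15-element chunks;
-- the nonnegative in-range slices block[a:b] are List.take/List.drop (exact there)
def pvAltChunks (l : List Int) : List Int × List Int × List Int :=
  if l = [] then ([], [], [])
  else
    let b := l.take 15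
    let r := pvAltChunks (l.drop 15)
    (b.take 5 ++ r.1, (b.drop 5).take 5 ++ r.2.1, (b.drop 10).take 5 ++ r.2.2)
termination_by l.length
decreasing_by
  simp only [List.length_drop]
  have hl : 0 < l.length := List.length_pos_iff.mpr (by assumption)
  omega

def convert_data_for_inter_annotator_clac_alt (actual : List Int) (predicted : List Int) : List (String × List Int) :=
  let t := pvAltChunks predicted
  [("expert", actual), ("A1", t.1), ("A2", t.2.1), ("A3", t.2.2)]

-- ===== PRECONDITION & SPEC =====
def Spec_convert_data_for_inter_annotator_clac (actual : List Int) (predicted : List Int) (out : List (String × List Int)) : Prop := out = convert_data_for_inter_annotator_clac_alt actual predicted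
instance (actual : List Int) (predicted : List Int) (out : List (String × List Int)) : Decidable (Spec_convert_data_for_inter_annotator_clac actual predicted out) := by unfold Spec_convert_data_for_inter_annotator_clac; infer_instance

-- ===== CLAIM (what is proved, stated in full; the proofs are below) =====
def Claim_equal_convert_data_for_inter_annotator_clac : Prop := ∀ (actual : List Int) (predicted : List Int), Dom_convert_data_for_inter_annotator_clac actual predicted → Spec_convert_data_for_inter_annotator_clac actual predicted (convert_data_for_inter_annotator_clac actual predicted)

-- ===== LEMMAS AND PROOFS =====

-- proof-only reference function: the three buckets produced from start index i
def pvAux : Nat → List Int → List Int × List Int × List Int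
  | _, [] => ([], [], [])
  | i, x :: xs =>
    let r := pvAux (i+1) xs
    if i % 15 ≤ 4 then (x :: r.1, r.2.1, r.2.2)
    else if i % 15 ≤ 9 then (r.1, x :: r.2.1, r.2.2)
    else (r.1, r.2.1, x :: r.2.2)

lemma pvFoldA (ls : List Int) : ∀ (i : Nat) (e a b c : List Int),
    ((PySem.List.enumerate ls (i : Int)).foldl (fun d p =>
      if PySem.Int.mod p.1 15 ≤ 4 then d.modify "A1" [] (fun l => l ++ [p.2])
      else if 4 < PySem.Int.mod p.1 15 ∧ PySem.Int.mod p.1 15 ≤ 9 then d.modify "A2" [] (fun l => l ++ [p.2])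
      else d.modify "A3" [] (fun l => l ++ [p.2]))
      (PySem.Dict.ofList [("expert", e), ("A1", a), ("A2", b), ("A3", c)]))
    = PySem.Dict.ofList [("expert", e), ("A1", a ++ (pvAux i ls).1),
        ("A2", b ++ (pvAux i ls).2.1), ("A3", c ++ (pvAux i ls).2.2)] := by
  induction ls with
  | nil => intro i e a b c; simp [PySem.List.enumerate_nil, pvAux]
  | cons x xs ih =>
    intro i e a b c
    rw [PySem.List.enumerate_cons, List.foldl_cons]
    have hm : PySem.Int.mod (i : Int) 15 = ((i % 15 : Nat) : Int) := by
      exact_mod_cast PySem.Int.mod_natCast i 15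
    have h1 : (PySem.Int.mod (i : Int) 15 ≤ 4) ↔ i % 15 ≤ 4 := by rw [hm]; exact_mod_cast Iff.rfl
    have h2 : (4 < PySem.Int.mod (i : Int) 15 ∧ PySem.Int.mod (i : Int) 15 ≤ 9) ↔
        (4 < i % 15 ∧ i % 15 ≤ 9) := by rw [hm]; exact_mod_cast Iff.rfl
    have hcast : (i : Int) + 1 = ((i + 1 : Nat) : Int) := by push_cast; ring
    by_cases hA : i % 15 ≤ 4
    · rw [if_pos (h1.mpr hA)]
      have hstep : (PySem.Dict.ofList [("expert", e), ("A1", a), ("A2", b), ("A3", c)]).modify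
          "A1" [] (fun l => l ++ [x])
          = PySem.Dict.ofList [("expert", e), ("A1", a ++ [x]), ("A2", b), ("A3", c)] := rfl
      rw [hstep, hcast, ih (i + 1) e (a ++ [x]) b c]
      simp [pvAux, hA, List.append_assoc]
    · by_cases hB : i % 15 ≤ 9
      · rw [if_neg (by rw [h1]; exact hA), if_pos (h2.mpr ⟨by omega, hB⟩)]
        have hstep : (PySem.Dict.ofList [("expert", e), ("A1", a), ("A2", b), ("A3", c)]).modify
            "A2" [] (fun l => l ++ [x])
            = PySem.Dict.ofList [("expert", e), ("A1", a), ("A2", b ++ [x]), ("A3", c)] := rfl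
        rw [hstep, hcast, ih (i + 1) e a (b ++ [x]) c]
        simp [pvAux, hA, hB, List.append_assoc]
      · have hn1 : ¬ (PySem.Int.mod (i : Int) 15 ≤ 4) := by rw [h1]; exact hA
        have hn2 : ¬ (4 < PySem.Int.mod (i : Int) 15 ∧ PySem.Int.mod (i : Int) 15 ≤ 9) := by
          rw [h2]; omega
        rw [if_neg hn1, if_neg hn2]
        have hstep : (PySem.Dict.ofList [("expert", e), ("A1", a), ("A2", b), ("A3", c)]).modify
            "A3" [] (fun l => l ++ [x])
            = PySem.Dict.ofList [("expert", e), ("A1", a), ("A2", b), ("A3", c ++ [x])] := rfl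
        rw [hstep, hcast, ih (i + 1) e a b (c ++ [x])]
        simp [pvAux, hA, hB, List.append_assoc]

lemma pvAux_congr_mod : ∀ (ls : List Int) (i j : Nat), i % 15 = j % 15 → pvAux i ls = pvAux j ls := by
  intro ls
  induction ls with
  | nil => intro i j _; rfl
  | cons x xs ih =>
    intro i j h
    have h' : (i + 1) % 15 = (j + 1) % 15 := by omega
    simp only [pvAux, h, ih (i + 1) (j + 1) h']

lemma pvAux_append : ∀ (xs ys : List Int) (i : Nat),
    pvAux i (xs ++ ys) = ((pvAux i xs).1 ++ (pvAux (i + xs.length) ys).1,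
      (pvAux i xs).2.1 ++ (pvAux (i + xs.length) ys).2.1,
      (pvAux i xs).2.2 ++ (pvAux (i + xs.length) ys).2.2) := by
  intro xs
  induction xs with
  | nil => intro ys i; simp [pvAux]
  | cons x xs ih =>
    intro ys i
    simp only [List.cons_append, pvAux, ih ys (i + 1), List.length_cons]
    have : i + 1 + xs.length = i + (xs.length + 1) := by omega
    rw [this]
    split_ifs <;> simp

lemma pvAux_small : ∀ (xs : List Int) (j : Nat), j + xs.length ≤ 15 →
    pvAux j xs = (xs.take (5 - j), (xs.drop (5 - j)).take ((10 - j) - (5 - j)), xs.drop (10 - j)) := by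
  intro xs
  induction xs with
  | nil => intro j _; simp [pvAux]
  | cons x xs ih =>
    intro j hj
    have hjlt : j < 15 := by simp [List.length_cons] at hj; omega
    have hmod : j % 15 = j := Nat.mod_eq_of_lt hjlt
    have hih := ih (j + 1) (by simp at hj ⊢; omega)
    by_cases hA : j ≤ 4
    · have e1 : 5 - j = (4 - j) + 1 := by omega
      have e2 : 10 - j = (9 - j) + 1 := by omega
      simp only [pvAux, hmod, if_pos hA, hih]
      rw [e1, e2]
      have e3 : 5 - (j + 1) = 4 - j := by omega
      have e4 : 10 - (j + 1) = 9 - j := by omega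
      have e5 : (10 - j) - (5 - j) = 5 := by omega
      have e6 : (10 - (j + 1)) - (5 - (j + 1)) = 5 := by omega
      simp [e3, e4, List.take_succ_cons, List.drop_succ_cons]
    · by_cases hB : j ≤ 9
      · have e1 : 5 - j = 0 := by omega
        have e3 : 5 - (j + 1) = 0 := by omega
        have e2 : 10 - j = (9 - j) + 1 := by omega
        have e4 : 10 - (j + 1) = 9 - j := by omega
        have e5 : (10 - j) - (5 - j) = (9 - j) + 1 := by omega
        have e6 : (10 - (j + 1)) - (5 - (j + 1)) = 9 - j := by omega
        simp only [pvAux, hmod, if_neg hA, if_pos hB, hih]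
        simp [e1, e2, e3, e4, List.take_succ_cons, List.drop_succ_cons]
      · have e1 : 5 - j = 0 := by omega
        have e2 : 10 - j = 0 := by omega
        have e3 : 5 - (j + 1) = 0 := by omega
        have e4 : 10 - (j + 1) = 0 := by omega
        simp only [pvAux, hmod, if_neg hA, if_neg hB, hih]
        simp [e1, e2, e3, e4]

lemma pvChunks_eq_aux_bounded : ∀ (n : Nat) (l : List Int), l.length ≤ n → pvAltChunks l = pvAux 0 l := by
  intro n
  induction n with
  | zero =>
    intro l hl
    have : l = [] := List.eq_nil_of_length_eq_zero (by omega)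
    subst this
    simp [pvAltChunks, pvAux]
  | succ n ih =>
    intro l hl
    by_cases hnil : l = []
    · subst hnil
      simp [pvAltChunks, pvAux]
    · rw [pvAltChunks.eq_def, if_neg hnil]
      have hdrop : (l.drop 15).length ≤ n := by
        have : 0 < l.length := List.length_pos_iff.mpr hnil
        simp [List.length_drop]; omega
      rw [ih (l.drop 15) hdrop]
      have hsplit : l = l.take 15 ++ l.drop 15 := (List.take_append_drop 15 l).symm
      conv_rhs => rw [hsplit]
      rw [pvAux_append]
      have htlen : (l.take 15).length ≤ 15 := by simp
      rw [pvAux_small (l.take 15) 0 (by omega)]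
      have hdroptail : pvAux (0 + (l.take 15).length) (l.drop 15) = pvAux 0 (l.drop 15) := by
        by_cases h15 : 15 ≤ l.length
        · have : (l.take 15).length = 15 := by rw [List.length_take]; omega
          rw [this]
          exact pvAux_congr_mod (l.drop 15) (0 + 15) 0 (by omega)
        · have : l.drop 15 = [] := List.drop_eq_nil_of_le (by omega)
          rw [this]; rfl
      rw [hdroptail]
      have htake : ((l.take 15).drop 10).take 5 = (l.take 15).drop 10 := by
        apply List.take_of_length_le
        rw [List.length_drop, List.length_take]
        omega
      have e5 : (10 - 0) - (5 - 0) = 5 := by norm_num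
      simp [htake, e5]

-- ===== VERDICT (by name: the statement is the Claim_ definition above) =====
theorem convert_data_for_inter_annotator_clac_spec : Claim_equal_convert_data_for_inter_annotator_clac := by
  intro actual predicted _
  show convert_data_for_inter_annotator_clac actual predicted
      = convert_data_for_inter_annotator_clac_alt actual predicted
  unfold convert_data_for_inter_annotator_clac convert_data_for_inter_annotator_clac_alt
  have hins : (PySem.Dict.ofList
      [("expert", ([] : List Int)), ("A1", []), ("A2", []), ("A3", [])]).insert "expert" actual
      = PySem.Dict.ofList [("expert", actual), ("A1", []), ("A2", []), ("A3", [])] := rfl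
  simp only [hins]
  have h0 : ((0 : Int)) = ((0 : Nat) : Int) := by norm_num
  rw [h0, pvFoldA predicted 0 actual [] [] []]
  rw [← pvChunks_eq_aux_bounded predicted.length predicted le_rfl]
  rfl
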